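-- pv_equiv track=rewrite | github.com/mrpoodle/AdventOfCode | 2023/scripts/day13.py | find_mirrow_over_rows
-- ===== SOURCE A (Python) =====
-- def find_mirrow_over_rows(pattern, old_mirrors=None):
--         for i, line in enumerate(pattern):
--             if old_mirrors and old_mirrors == i:
--                 continue
--             candidate = None
--             if i == 0:
--                 continue
--             if line == pattern[i-1]:
--                 candidate = i
--                 for j in range(1, i):
--                     if i-1-j < 0 or i+j > len(pattern)-1:
--                         break
--                     if pattern[i-1-j] != pattern[i+j]:
--                         candidate = None
--                         break
--                 if candidate:
--                     return True, candidate
--         return False, None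
-- ===== SOURCE B (Python) =====
-- def find_mirrow_over_rows(pattern, old_mirrors=None):
--     n = len(pattern)
--     for i in range(1, n):
--         if old_mirrors and old_mirrors == i:
--             continue
--         k = min(i, n - i)
--         if pattern[i - k:i] == pattern[i:i + k][::-1]:
--             return True, i
--     return False, None
-- ===== Notes on version B (the rewrite author's own statement) =====
-- stated objective: simpler
-- what changed: B replaces A's per-center nested inner loop with explicit break/candidate state by a single slice comparison per center: the reversed suffix slice is compared with the prefix slice of the overlap width min(i, n-i).
import Mathlib
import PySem

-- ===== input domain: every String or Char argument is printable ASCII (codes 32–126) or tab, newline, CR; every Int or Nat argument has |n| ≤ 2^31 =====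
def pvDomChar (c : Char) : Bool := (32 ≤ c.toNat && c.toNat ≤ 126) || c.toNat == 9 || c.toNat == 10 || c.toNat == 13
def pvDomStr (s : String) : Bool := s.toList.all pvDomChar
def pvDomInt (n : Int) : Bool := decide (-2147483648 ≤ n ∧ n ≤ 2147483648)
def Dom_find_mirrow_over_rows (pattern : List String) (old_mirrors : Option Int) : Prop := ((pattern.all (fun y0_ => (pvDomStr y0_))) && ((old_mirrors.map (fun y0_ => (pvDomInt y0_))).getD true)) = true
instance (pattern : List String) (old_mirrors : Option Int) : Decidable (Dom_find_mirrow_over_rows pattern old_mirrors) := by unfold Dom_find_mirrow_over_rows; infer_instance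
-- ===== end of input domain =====

-- B replaces A's nested inner loop (candidate/break state) by one slice-vs-reversed-slice
-- comparison per center; objective: simpler, same asymptotic cost.

-- ===== PORT A =====
-- inner 'for j in range(1, i)' loop: returns the final 'candidate' (some i, or none after a mismatch)
def pvInnerA (p : List String) (i : Int) : List Int → Option Int
  | [] => some i
  | j :: rest =>
      if i - 1 - j < 0 ∨ i + j > (p.length : Int) - 1 then some i
      else if PySem.List.pyGet? p (i - 1 - j) ≠ PySem.List.pyGet? p (i + j) then none
      else pvInnerA p i rest

-- outer 'for i, line in enumerate(pattern)' loop with early return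
def pvLoopA (p : List String) (om : Option Int) : List (Int × String) → Bool × Option Int
  | [] => (false, none)
  | (i, line) :: rest =>
      if om = some i ∧ i ≠ 0 then pvLoopA p om rest
      else if i = 0 then pvLoopA p om rest
      else if PySem.List.pyGet? p (i - 1) = some line then
        match pvInnerA p i (PySem.List.pyRange 1 i 1) with
        | some c => if c ≠ 0 then (true, some c) else pvLoopA p om rest
        | none => pvLoopA p om rest
      else pvLoopA p om rest

def find_mirrow_over_rows (pattern : List String) (old_mirrors : Option Int) : Bool × Option Int :=
  pvLoopA pattern old_mirrors (PySem.List.enumerate pattern)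

-- ===== PORT B =====
-- 'for i in range(1, n)' loop; pattern[i:i+k][::-1] ported as (slice …).reverse
def pvLoopB (p : List String) (om : Option Int) (n : Int) : List Int → Bool × Option Int
  | [] => (false, none)
  | i :: rest =>
      if om = some i ∧ i ≠ 0 then pvLoopB p om n rest
      else
        let k := min i (n - i)
        if PySem.List.slice p (some (i - k)) (some i)
             = (PySem.List.slice p (some i) (some (i + k))).reverse
        then (true, some i)
        else pvLoopB p om n rest

def find_mirrow_over_rows_alt (pattern : List String) (old_mirrors : Option Int) : Bool × Option Int :=
  pvLoopB pattern old_mirrors (pattern.length : Int) (PySem.List.pyRange 1 (pattern.length : Int) 1)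

-- ===== PRECONDITION & SPEC =====
def Spec_find_mirrow_over_rows (pattern : List String) (old_mirrors : Option Int) (out : Bool × Option Int) : Prop := out = find_mirrow_over_rows_alt pattern old_mirrors
instance (pattern : List String) (old_mirrors : Option Int) (out : Bool × Option Int) : Decidable (Spec_find_mirrow_over_rows pattern old_mirrors out) := by unfold Spec_find_mirrow_over_rows; infer_instance

-- ===== CLAIM (what is proved, stated in full; the proofs are below) =====
def Claim_equal_find_mirrow_over_rows : Prop := ∀ (pattern : List String) (old_mirrors : Option Int), Dom_find_mirrow_over_rows pattern old_mirrors → Spec_find_mirrow_over_rows pattern old_mirrors (find_mirrow_over_rows pattern old_mirrors)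

-- ===== LEMMAS AND PROOFS =====

lemma pvLoopA_cons (p : List String) (om : Option Int) (i : Int) (line : String) (rest : List (Int × String)) :
    pvLoopA p om ((i, line) :: rest) =
      (if om = some i ∧ i ≠ 0 then pvLoopA p om rest
      else if i = 0 then pvLoopA p om rest
      else if PySem.List.pyGet? p (i - 1) = some line then
        match pvInnerA p i (PySem.List.pyRange 1 i 1) with
        | some c => if c ≠ 0 then (true, some c) else pvLoopA p om rest
        | none => pvLoopA p om rest
      else pvLoopA p om rest) := rfl

lemma pvLoopB_cons (p : List String) (om : Option Int) (n : Int) (i : Int) (rest : List Int) :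
    pvLoopB p om n (i :: rest) =
      (if om = some i ∧ i ≠ 0 then pvLoopB p om n rest
      else if PySem.List.slice p (some (i - min i (n - i))) (some i)
             = (PySem.List.slice p (some i) (some (i + min i (n - i)))).reverse
        then (true, some i)
        else pvLoopB p om n rest) := rfl

-- pvInnerA returns either none or its starting candidate i
lemma pvInnerA_eq_some (p : List String) (i : Int) (l : List Int) (c : Int)
    (h : pvInnerA p i l = some c) : c = i := by
  induction l with
  | nil => exact (Option.some.inj h).symm
  | cons j rest ih =>
      simp only [pvInnerA] at h
      split_ifs at h with h1 h2 <;>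
        first
          | exact (Option.some.inj h).symm
          | exact absurd h (by simp)
          | exact ih h

-- characterisation of A's inner loop over range a..i-1
lemma pvInnerA_char (p : List String) (k : Nat) (hk : k < p.length) :
    ∀ (m a : Nat), k - a = m → 1 ≤ a →
      (pvInnerA p (k : Int) (PySem.List.pyRange (a : Int) (k : Int) 1) = some (k : Int) ↔
        ∀ j : Nat, a ≤ j → j < min k (p.length - k) → p[k - 1 - j]? = p[k + j]?) := by
  intro m
  induction m with
  | zero =>
      intro a hm ha
      have hak : k ≤ a := by omega
      have hempty : PySem.List.pyRange (a : Int) (k : Int) 1 = [] := by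
        simp [PySem.List.pyRange]; omega
      rw [hempty]
      simp only [pvInnerA, true_iff]
      intro j haj hj
      omega
  | succ m ih =>
      intro a hm ha
      have hak : a < k := by omega
      rw [PySem.List.pyRange_one_cons (show (a : Int) < (k : Int) by omega)]
      simp only [pvInnerA]
      by_cases hbr : (k : Int) + (a : Int) > (p.length : Int) - 1
      · rw [if_pos (Or.inr hbr)]
        constructor
        · intro _ j haj hj; omega
        · intro _; rfl
      · rw [if_neg (by omega)]
        have e1 : (k : Int) - 1 - (a : Int) = ((k - 1 - a : Nat) : Int) := by omega
        have e2 : (k : Int) + (a : Int) = ((k + a : Nat) : Int) := by omega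
        rw [e1, e2, PySem.List.pyGet?_natCast, PySem.List.pyGet?_natCast]
        by_cases heq : p[k - 1 - a]? = p[k + a]?
        · rw [if_neg (by simpa using heq)]
          have e3 : (a : Int) + 1 = ((a + 1 : Nat) : Int) := by push_cast; ring
          rw [e3, ih (a + 1) (by omega) (by omega)]
          constructor
          · intro h j haj hj
            rcases Nat.eq_or_lt_of_le haj with h' | h'
            · rw [← h']; exact heq
            · exact h j (by omega) hj
          · intro h j haj hj; exact h j (by omega) hj
        · rw [if_pos (by simpa using heq)]
          constructor
          · intro h; exact absurd h (by simp)
          · intro h; exact absurd (h a le_rfl (by omega)) heq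

-- characterisation of B's slice test
lemma sliceB_char (p : List String) (k : Nat) (h1 : 1 ≤ k) (hk : k < p.length) :
    (PySem.List.slice p (some ((k : Int) - min (k : Int) ((p.length : Int) - (k : Int)))) (some (k : Int))
        = (PySem.List.slice p (some (k : Int)) (some ((k : Int) + min (k : Int) ((p.length : Int) - (k : Int))))).reverse) ↔
      (∀ j : Nat, j < min k (p.length - k) → p[k - 1 - j]? = p[k + j]?) := by
  set kk : Nat := min k (p.length - k) with hkkdef
  have hkk1 : 1 ≤ kk := by omega
  have hkkk : kk ≤ k := by omega
  have hkknk : kk ≤ p.length - k := by omega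
  have emin : min (k : Int) ((p.length : Int) - (k : Int)) = ((kk : Nat) : Int) := by
    rw [hkkdef]; push_cast; omega
  have e1 : (k : Int) - ((kk : Nat) : Int) = ((k - kk : Nat) : Int) := by omega
  have e2 : (k : Int) + ((kk : Nat) : Int) = ((k + kk : Nat) : Int) := by omega
  rw [emin, e1, e2, PySem.List.slice_natCast, PySem.List.slice_natCast]
  have ek1 : k - (k - kk) = kk := by omega
  have ek2 : (k + kk) - k = kk := by omega
  rw [ek1, ek2]
  have hLlen : (List.take kk (List.drop (k - kk) p)).length = kk := by
    simp [List.length_take, List.length_drop]; omega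
  have hRlen : (List.take kk (List.drop k p)).length = kk := by
    simp [List.length_take, List.length_drop]; omega
  have hL : ∀ j : Nat, j < kk → (List.take kk (List.drop (k - kk) p))[j]? = p[(k - kk) + j]? := by
    intro j hj
    simp [List.getElem?_drop, hj]
  have hR : ∀ j : Nat, j < kk → (List.take kk (List.drop k p)).reverse[j]? = p[k + (kk - 1 - j)]? := by
    intro j hj
    rw [List.getElem?_reverse (by rw [hRlen]; omega), hRlen]
    simp [List.getElem?_drop, show kk - 1 - j < kk by omega]
  constructor
  · intro hEq j hj
    have h1' := hL (kk - 1 - j) (by omega)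
    rw [hEq, hR (kk - 1 - j) (by omega)] at h1'
    have i1 : (k - kk) + (kk - 1 - j) = k - 1 - j := by omega
    have i2 : kk - 1 - (kk - 1 - j) = j := by omega
    rw [i1, i2] at h1'
    exact h1'.symm
  · intro h
    apply List.ext_getElem?
    intro j
    by_cases hj : j < kk
    · rw [hL j hj, hR j hj]
      have h1' := h (kk - 1 - j) (by omega)
      have i1 : k - 1 - (kk - 1 - j) = (k - kk) + j := by omega
      rw [i1] at h1'
      exact h1'
    · rw [List.getElem?_eq_none (by rw [hLlen]; omega),
        List.getElem?_eq_none (by rw [List.length_reverse, hRlen]; omega)]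

-- the two loops agree on the common tail range a..n-1 (a ≥ 1)
lemma loop_eq (p : List String) (om : Option Int) :
    ∀ (m a : Nat), p.length - a = m → 1 ≤ a →
      pvLoopA p om ((PySem.List.pyRange (a : Int) (p.length : Int) 1).map
          (fun j => (j, PySem.List.pyGetD p j "")))
        = pvLoopB p om (p.length : Int) (PySem.List.pyRange (a : Int) (p.length : Int) 1) := by
  intro m
  induction m with
  | zero =>
      intro a hm ha
      have hempty : PySem.List.pyRange (a : Int) (p.length : Int) 1 = [] := by
        simp [PySem.List.pyRange]; omega
      rw [hempty]
      rfl
  | succ m ih =>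
      intro a hm ha
      have hak : a < p.length := by omega
      rw [PySem.List.pyRange_one_cons (show (a : Int) < (p.length : Int) by omega)]
      rw [List.map_cons, pvLoopA_cons, pvLoopB_cons]
      have e3 : (a : Int) + 1 = ((a + 1 : Nat) : Int) := by push_cast; ring
      have hrec := ih (a + 1) (by omega) (by omega)
      rw [e3]
      by_cases hskip : om = some (a : Int) ∧ (a : Int) ≠ 0
      · rw [if_pos hskip, if_pos hskip, hrec]
      · rw [if_neg hskip, if_neg hskip, if_neg (show ¬((a : Int) = 0) by omega)]
        have hB := sliceB_char p a ha hak
        have hgetD : PySem.List.pyGetD p (a : Int) "" = p.getD a "" := PySem.List.pyGetD_natCast p a ""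
        have hgetD' : p.getD a "" = p[a] := List.getD_eq_getElem p "" hak
        have e1 : (a : Int) - 1 = ((a - 1 : Nat) : Int) := by omega
        have houtiff : (PySem.List.pyGet? p ((a : Int) - 1) = some (PySem.List.pyGetD p (a : Int) ""))
            ↔ p[a - 1]? = p[a]? := by
          rw [e1, PySem.List.pyGet?_natCast, hgetD, hgetD', List.getElem?_eq_getElem hak]
        by_cases hout : p[a - 1]? = p[a]?
        · rw [if_pos (houtiff.mpr hout)]
          have hchar := pvInnerA_char p a hak (a - 1) 1 (by omega) le_rfl
          rw [Nat.cast_one] at hchar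
          split
          next c hinner =>
              have hc : c = (a : Int) := pvInnerA_eq_some p _ _ _ hinner
              subst hc
              rw [if_pos (show (a : Int) ≠ 0 by omega)]
              have hall : ∀ j : Nat, j < min a (p.length - a) → p[a - 1 - j]? = p[a + j]? := by
                intro j hj
                rcases Nat.eq_zero_or_pos j with h0 | h0
                · subst h0; simpa using hout
                · exact (hchar.mp hinner) j h0 hj
              rw [if_pos (hB.mpr hall)]
          next hinner =>
              have hnall : ¬ (∀ j : Nat, j < min a (p.length - a) → p[a - 1 - j]? = p[a + j]?) := by
                intro hall
                have hsome : pvInnerA p (a : Int) (PySem.List.pyRange 1 (a : Int) 1) = some (a : Int) :=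
                  hchar.mpr (fun j h1j hj => hall j hj)
                rw [hinner] at hsome; exact absurd hsome (by simp)
              rw [if_neg (fun hs => hnall (hB.mp hs)), hrec]
        · rw [if_neg (fun h => hout (houtiff.mp h))]
          have hnall : ¬ (∀ j : Nat, j < min a (p.length - a) → p[a - 1 - j]? = p[a + j]?) := by
            intro hall
            exact hout (by simpa using hall 0 (by omega))
          rw [if_neg (fun hs => hnall (hB.mp hs)), hrec]

-- ===== VERDICT (by name: the statement is the Claim_ definition above) =====
theorem find_mirrow_over_rows_spec : Claim_equal_find_mirrow_over_rows := by
  intro pattern om _dom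
  show find_mirrow_over_rows pattern om = find_mirrow_over_rows_alt pattern om
  unfold find_mirrow_over_rows find_mirrow_over_rows_alt
  rw [PySem.List.enumerate_eq_map_pyRange pattern ""]
  have hlen : PySem.List.len pattern = (pattern.length : Int) := rfl
  rw [hlen]
  by_cases h0 : pattern.length = 0
  · have h1 : PySem.List.pyRange (0 : Int) (pattern.length : Int) 1 = [] := by
      simp [PySem.List.pyRange]; omega
    have h2 : PySem.List.pyRange (1 : Int) (pattern.length : Int) 1 = [] := by
      simp [PySem.List.pyRange]; omega
    rw [h1, h2]; rfl
  · rw [PySem.List.pyRange_one_cons (show (0 : Int) < (pattern.length : Int) by omega)]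
    rw [List.map_cons, pvLoopA_cons]
    rw [if_neg (show ¬(om = some 0 ∧ (0 : Int) ≠ 0) from fun h => h.2 rfl), if_pos rfl]
    have := loop_eq pattern om (pattern.length - 1) 1 rfl le_rfl
    simpa using this
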